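-- pv_equiv track=rewrite | github.com/Dhruv1240/python-modulizer- | pyfract_core/planning.py | _tool_cli_bucket
-- ===== SOURCE A (Python) =====
-- def _tool_cli_bucket(name: str, kind: str, signature_excerpt: str) -> str:
--     lowered = name.lower()
--     text = f"{lowered} {signature_excerpt.lower()}"
--     if kind == "class":
--         if lowered in {"symbolinfo", "segment"} or "dataclass" in text:
--             return "models"
--         if any(token in lowered for token in ["analyzer", "collector", "parser", "resolver", "scope"]):
--             return "analysis"
--         if any(token in lowered for token in ["planner", "client"]):
--             return "planning"
--         if any(token in lowered for token in ["writer", "builder", "exporter", "renderer"]):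
--             return "writing"
--         if any(token in lowered for token in ["validator", "checker", "verifier"]):
--             return "writing"
--     if any(token in text for token in ["@app.command", "typer.typer", "__main__", "version(", "init_config(", "modularize("]):
--         return "cli"
--     if any(token in lowered for token in ["analyze", "parse", "collect", "resolve", "dependency"]):
--         return "analysis"
--     if any(token in lowered for token in ["plan", "group", "sanitize", "cycle"]):
--         return "planning"
--     if any(token in lowered for token in ["write", "import", "validate", "sort_modules"]):
--         return "writing"
--     return "shared"
-- ===== SOURCE B (Python) =====
-- # Flat keyword table: every token carries (scope, priority, bucket).  All hits are
-- # collected in one comprehension and the bucket of the minimum-priority hit wins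
-- # (default "shared") -- no early-return cascade.
-- _CLASS_KEYWORDS = [
--     ("exact", "symbolinfo", 0, "models"),
--     ("exact", "segment", 0, "models"),
--     ("text", "dataclass", 0, "models"),
--     ("name", "analyzer", 1, "analysis"),
--     ("name", "collector", 1, "analysis"),
--     ("name", "parser", 1, "analysis"),
--     ("name", "resolver", 1, "analysis"),
--     ("name", "scope", 1, "analysis"),
--     ("name", "planner", 2, "planning"),
--     ("name", "client", 2, "planning"),
--     ("name", "writer", 3, "writing"),
--     ("name", "builder", 3, "writing"),
--     ("name", "exporter", 3, "writing"),
--     ("name", "renderer", 3, "writing"),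
--     ("name", "validator", 4, "writing"),
--     ("name", "checker", 4, "writing"),
--     ("name", "verifier", 4, "writing"),
-- ]
-- _GENERAL_KEYWORDS = [
--     ("text", "@app.command", 5, "cli"),
--     ("text", "typer.typer", 5, "cli"),
--     ("text", "__main__", 5, "cli"),
--     ("text", "version(", 5, "cli"),
--     ("text", "init_config(", 5, "cli"),
--     ("text", "modularize(", 5, "cli"),
--     ("name", "analyze", 6, "analysis"),
--     ("name", "parse", 6, "analysis"),
--     ("name", "collect", 6, "analysis"),
--     ("name", "resolve", 6, "analysis"),
--     ("name", "dependency", 6, "analysis"),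
--     ("name", "plan", 7, "planning"),
--     ("name", "group", 7, "planning"),
--     ("name", "sanitize", 7, "planning"),
--     ("name", "cycle", 7, "planning"),
--     ("name", "write", 8, "writing"),
--     ("name", "import", 8, "writing"),
--     ("name", "validate", 8, "writing"),
--     ("name", "sort_modules", 8, "writing"),
-- ]
--
--
-- def _tool_cli_bucket(name: str, kind: str, signature_excerpt: str) -> str:
--     lowered = name.lower()
--     text = lowered + " " + signature_excerpt.lower()
--     table = _CLASS_KEYWORDS + _GENERAL_KEYWORDS if kind == "class" else _GENERAL_KEYWORDS
--     hits = [(priority, bucket)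
--             for scope, token, priority, bucket in table
--             if (token == lowered if scope == "exact"
--                 else token in (text if scope == "text" else lowered))]
--     return min(hits, key=lambda hit: hit[0])[1] if hits else "shared"
-- ===== Notes on version B (the rewrite author's own statement) =====
-- stated objective: alternative
-- what changed: Replaced A's early-return if-cascade over token groups by a flat keyword table (scope, token, priority, bucket): one comprehension collects every matching keyword as a (priority, bucket) hit and the bucket of the minimum-priority hit is returned (default 'shared'), so there is no cascade and no short-circuiting.
import Mathlib
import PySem

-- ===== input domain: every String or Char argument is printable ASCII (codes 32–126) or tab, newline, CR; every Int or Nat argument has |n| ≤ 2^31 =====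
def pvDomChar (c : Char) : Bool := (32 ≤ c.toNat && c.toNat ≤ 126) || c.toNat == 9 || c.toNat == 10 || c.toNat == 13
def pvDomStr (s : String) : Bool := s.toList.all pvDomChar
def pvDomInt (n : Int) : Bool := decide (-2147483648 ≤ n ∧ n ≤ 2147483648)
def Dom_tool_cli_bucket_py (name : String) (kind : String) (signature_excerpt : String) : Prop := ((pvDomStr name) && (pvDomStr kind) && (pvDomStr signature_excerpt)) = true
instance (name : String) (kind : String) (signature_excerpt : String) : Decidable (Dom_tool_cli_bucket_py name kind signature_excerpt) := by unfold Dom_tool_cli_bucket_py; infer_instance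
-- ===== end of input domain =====

-- B replaces A's early-return if-cascade by a flat keyword table; all matching keywords are
-- collected as (priority, bucket) hits and the minimum-priority hit's bucket wins (alternative; same cost).


-- ===== PORT A =====
-- the part of A after the class block (A's class branch falls through to it when no class rule hits)
def tool_cli_bucket_py_tail (lowered : String) (text : String) : String :=
  if ["@app.command", "typer.typer", "__main__", "version(", "init_config(", "modularize("].any (fun t => PySem.Str.isIn t text) then "cli"
  else if ["analyze", "parse", "collect", "resolve", "dependency"].any (fun t => PySem.Str.isIn t lowered) then "analysis"
  else if ["plan", "group", "sanitize", "cycle"].any (fun t => PySem.Str.isIn t lowered) then "planning"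
  else if ["write", "import", "validate", "sort_modules"].any (fun t => PySem.Str.isIn t lowered) then "writing"
  else "shared"

def tool_cli_bucket_py (name : String) (kind : String) (signature_excerpt : String) : String :=
  let lowered := PySem.Str.lower name
  let text := lowered ++ " " ++ PySem.Str.lower signature_excerpt
  if kind == "class" then
    if ["symbolinfo", "segment"].contains lowered || PySem.Str.isIn "dataclass" text then "models"
    else if ["analyzer", "collector", "parser", "resolver", "scope"].any (fun t => PySem.Str.isIn t lowered) then "analysis"
    else if ["planner", "client"].any (fun t => PySem.Str.isIn t lowered) then "planning"
    else if ["writer", "builder", "exporter", "renderer"].any (fun t => PySem.Str.isIn t lowered) then "writing"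
    else if ["validator", "checker", "verifier"].any (fun t => PySem.Str.isIn t lowered) then "writing"
    else tool_cli_bucket_py_tail lowered text
  else tool_cli_bucket_py_tail lowered text

-- ===== PORT B =====
-- entry = (scope, token, priority, bucket); scope "exact" = whole lowered name, "text" = substring of text, "name" = substring of lowered
def pvClassKeywords : List (String × String × Int × String) :=
  [ ("exact", "symbolinfo", 0, "models"), ("exact", "segment", 0, "models"),
    ("text", "dataclass", 0, "models"),
    ("name", "analyzer", 1, "analysis"), ("name", "collector", 1, "analysis"),
    ("name", "parser", 1, "analysis"), ("name", "resolver", 1, "analysis"), ("name", "scope", 1, "analysis"),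
    ("name", "planner", 2, "planning"), ("name", "client", 2, "planning"),
    ("name", "writer", 3, "writing"), ("name", "builder", 3, "writing"),
    ("name", "exporter", 3, "writing"), ("name", "renderer", 3, "writing"),
    ("name", "validator", 4, "writing"), ("name", "checker", 4, "writing"), ("name", "verifier", 4, "writing") ]

def pvGeneralKeywords : List (String × String × Int × String) :=
  [ ("text", "@app.command", 5, "cli"), ("text", "typer.typer", 5, "cli"),
    ("text", "__main__", 5, "cli"), ("text", "version(", 5, "cli"),
    ("text", "init_config(", 5, "cli"), ("text", "modularize(", 5, "cli"),
    ("name", "analyze", 6, "analysis"), ("name", "parse", 6, "analysis"),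
    ("name", "collect", 6, "analysis"), ("name", "resolve", 6, "analysis"), ("name", "dependency", 6, "analysis"),
    ("name", "plan", 7, "planning"), ("name", "group", 7, "planning"),
    ("name", "sanitize", 7, "planning"), ("name", "cycle", 7, "planning"),
    ("name", "write", 8, "writing"), ("name", "import", 8, "writing"),
    ("name", "validate", 8, "writing"), ("name", "sort_modules", 8, "writing") ]

-- the comprehension's filter condition
def pvPresent (lowered : String) (text : String) (e : String × String × Int × String) : Bool :=
  if e.1 == "exact" then e.2.1 == lowered
  else PySem.Str.isIn e.2.1 (if e.1 == "text" then text else lowered)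

def tool_cli_bucket_py_alt (name : String) (kind : String) (signature_excerpt : String) : String :=
  let lowered := PySem.Str.lower name
  let text := lowered ++ " " ++ PySem.Str.lower signature_excerpt
  let table := if kind == "class" then pvClassKeywords ++ pvGeneralKeywords else pvGeneralKeywords
  let hits := table.filterMap (fun e =>
    if pvPresent lowered text e then some (e.2.2.1, e.2.2.2) else none)
  match PySem.List.min? hits (fun hit => hit.1) with
  | some hit => hit.2
  | none => "shared"

-- ===== PRECONDITION & SPEC =====
def Spec_tool_cli_bucket_py (name : String) (kind : String) (signature_excerpt : String) (out : String) : Prop := out = tool_cli_bucket_py_alt name kind signature_excerpt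
instance (name : String) (kind : String) (signature_excerpt : String) (out : String) : Decidable (Spec_tool_cli_bucket_py name kind signature_excerpt out) := by unfold Spec_tool_cli_bucket_py; infer_instance

-- ===== CLAIM (what is proved, stated in full; the proofs are below) =====
def Claim_equal_tool_cli_bucket_py : Prop := ∀ (name : String) (kind : String) (signature_excerpt : String), Dom_tool_cli_bucket_py name kind signature_excerpt → Spec_tool_cli_bucket_py name kind signature_excerpt (tool_cli_bucket_py name kind signature_excerpt)

-- ===== LEMMAS AND PROOFS =====

-- a fold that keeps a minimal accumulator never replaces it
theorem pv_foldl_fix (f : Option (Int × String) → (Int × String) → Option (Int × String))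
    (t : List (Int × String)) (m : Int × String)
    (hf : ∀ (mm : Int × String) (x : Int × String),
      f (some mm) x = if x.1 < mm.1 then some x else some mm)
    (h : ∀ x ∈ t, m.1 ≤ x.1) : t.foldl f (some m) = some m := by
  induction t with
  | nil => rfl
  | cons y ys ih =>
      have hy : ¬ y.1 < m.1 := not_lt.mpr (h y List.mem_cons_self)
      rw [List.foldl_cons, hf m y, if_neg hy]
      exact ih (fun x hx => h x (List.mem_cons_of_mem _ hx))

theorem pv_min?_cons_min (m : Int × String) (t : List (Int × String))
    (h : ∀ x ∈ t, m.1 ≤ x.1) :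
    PySem.List.min? (m :: t) (fun hit => hit.1) = some m := by
  simp only [PySem.List.min?, List.foldl_cons]
  exact pv_foldl_fix _ t m (fun mm x => rfl) h

-- the first-match cascade over a keyword table (proof-side characterisation of B)
def pvCascade (lowered : String) (text : String) : List (String × String × Int × String) → String
  | [] => "shared"
  | e :: rest => if pvPresent lowered text e then e.2.2.2 else pvCascade lowered text rest

-- B's min-of-hits equals the first-match cascade when the table's priorities are nondecreasing
theorem pv_min_eq_cascade (lowered text : String) (table : List (String × String × Int × String))
    (hs : table.Pairwise (fun a b => a.2.2.1 ≤ b.2.2.1)) :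
    (match PySem.List.min? (table.filterMap (fun e =>
        if pvPresent lowered text e then some (e.2.2.1, e.2.2.2) else none)) (fun hit => hit.1) with
      | some hit => hit.2
      | none => "shared") = pvCascade lowered text table := by
  induction table with
  | nil => simp [PySem.List.min?, pvCascade]
  | cons e rest ih =>
      rcases List.pairwise_cons.mp hs with ⟨hp, hrest⟩
      by_cases hpres : pvPresent lowered text e
      · have hmin : ∀ x ∈ rest.filterMap (fun e =>
            if pvPresent lowered text e then some (e.2.2.1, e.2.2.2) else none),
            (e.2.2.1, e.2.2.2).1 ≤ x.1 := by
          intro x hx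
          rcases List.mem_filterMap.mp hx with ⟨a, ha, hfa⟩
          by_cases h2 : pvPresent lowered text a
          · simp only [if_pos h2, Option.some.injEq] at hfa
            subst hfa; exact hp a ha
          · simp [if_neg h2] at hfa
        simp only [List.filterMap_cons, if_pos hpres]
        rw [pv_min?_cons_min _ _ hmin]
        simp [pvCascade, hpres]
      · simp only [List.filterMap_cons, if_neg hpres]
        rw [ih hrest]
        simp [pvCascade, hpres]

-- cascading over one same-priority/same-bucket token group is the group's "any" test
theorem pv_cascade_group (lowered text scope b : String) (p : Int) (tokens : List String)
    (rest : List (String × String × Int × String)) :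
    pvCascade lowered text (tokens.map (fun t => (scope, t, p, b)) ++ rest)
      = if tokens.any (fun t => pvPresent lowered text (scope, t, p, b)) then b
        else pvCascade lowered text rest := by
  induction tokens with
  | nil => simp
  | cons t ts ih =>
      by_cases h : pvPresent lowered text (scope, t, p, b) <;>
        simp [pvCascade, h, ih]

-- ===== VERDICT (by name: the statement is the Claim_ definition above) =====
theorem tool_cli_bucket_py_spec : Claim_equal_tool_cli_bucket_py := by
  have hdecC : pvClassKeywords ++ pvGeneralKeywords =
      (["symbolinfo", "segment"].map (fun t => ("exact", t, (0:Int), "models"))) ++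
      ((["dataclass"].map (fun t => ("text", t, (0:Int), "models"))) ++
      ((["analyzer", "collector", "parser", "resolver", "scope"].map (fun t => ("name", t, (1:Int), "analysis"))) ++
      ((["planner", "client"].map (fun t => ("name", t, (2:Int), "planning"))) ++
      ((["writer", "builder", "exporter", "renderer"].map (fun t => ("name", t, (3:Int), "writing"))) ++
      ((["validator", "checker", "verifier"].map (fun t => ("name", t, (4:Int), "writing"))) ++
      ((["@app.command", "typer.typer", "__main__", "version(", "init_config(", "modularize("].map (fun t => ("text", t, (5:Int), "cli"))) ++
      ((["analyze", "parse", "collect", "resolve", "dependency"].map (fun t => ("name", t, (6:Int), "analysis"))) ++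
      ((["plan", "group", "sanitize", "cycle"].map (fun t => ("name", t, (7:Int), "planning"))) ++
      ((["write", "import", "validate", "sort_modules"].map (fun t => ("name", t, (8:Int), "writing"))) ++
      ([] : List (String × String × Int × String)))))))))))  := rfl
  have hdecG : pvGeneralKeywords =
      (["@app.command", "typer.typer", "__main__", "version(", "init_config(", "modularize("].map (fun t => ("text", t, (5:Int), "cli"))) ++
      ((["analyze", "parse", "collect", "resolve", "dependency"].map (fun t => ("name", t, (6:Int), "analysis"))) ++
      ((["plan", "group", "sanitize", "cycle"].map (fun t => ("name", t, (7:Int), "planning"))) ++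
      ((["write", "import", "validate", "sort_modules"].map (fun t => ("name", t, (8:Int), "writing"))) ++
      ([] : List (String × String × Int × String)))))  := rfl
  intro name kind signature_excerpt _
  unfold Spec_tool_cli_bucket_py tool_cli_bucket_py tool_cli_bucket_py_alt
  by_cases hk : kind == "class"
  · simp only [hk, if_true]
    rw [pv_min_eq_cascade _ _ _ (by decide), hdecC]
    simp only [pv_cascade_group, pvPresent]
    simp only [String.reduceBEq, Bool.false_eq_true, if_true, if_false,
      List.any_cons, List.any_nil, List.contains_cons,
      List.contains_nil, Bool.or_false, tool_cli_bucket_py_tail, pvCascade]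
    by_cases h1 : PySem.Str.lower name = "symbolinfo"
    · simp [h1]
    · have h1' : ¬("symbolinfo" = PySem.Str.lower name) := fun he => h1 he.symm
      by_cases h2 : PySem.Str.lower name = "segment"
      · simp [h2]
      · have h2' : ¬("segment" = PySem.Str.lower name) := fun he => h2 he.symm
        simp [beq_iff_eq, h1, h1', h2, h2']
  · simp only [hk, Bool.false_eq_true, if_false]
    rw [pv_min_eq_cascade _ _ _ (by decide), hdecG]
    simp only [pv_cascade_group, pvPresent]
    simp only [String.reduceBEq, Bool.false_eq_true, if_true, if_false,
      List.any_cons, List.any_nil, Bool.or_false, tool_cli_bucket_py_tail, pvCascade]
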